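-- pv_equiv track=rewrite | github.com/MKBD0102/Algorithm_Practice | 프로그래머스/1/17681. ［1차］ 비밀지도/［1차］ 비밀지도.py | solution
-- ===== SOURCE A (Python) =====
-- def solution(n, arr1, arr2):
--     def bin_num(n, l):
--         res = ''
--         while n != 0:
--             d = n % 2
--             n = n // 2
--             res = str(d) + res
--         return res.zfill(l)
--
--     map_fin = []
--     for i in range(n):
--         map1_row = bin_num(arr1[i],n)
--         map2_row = bin_num(arr2[i],n)
--
--         row = ''
--         for j in range(n):
--             if map1_row[j] == '1' or map2_row[j] == '1':
--                 row += '#'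
--             else:
--                 row += ' '
--         map_fin.append(row)
--     return map_fin
-- ===== SOURCE B (Python) =====
-- def solution(n, arr1, arr2):
--     return [format(arr1[i] | arr2[i], '0%db' % n).translate({48: ' ', 49: '#'})
--             for i in range(n)]
-- ===== Notes on version B (the rewrite author's own statement) =====
-- stated objective: idiomatic
-- what changed: B replaces A's hand-rolled per-number binary-conversion helper and the inner per-bit OR loop over two strings by OR-ing the two row integers directly, rendering the result once with format(v,'0nb') and mapping '1'/'0' to '#'/' ' with str.translate.
-- outside the precondition, e.g. on solution(1, [2], [0]): A returns ['#'], B returns ['# ']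
import Mathlib
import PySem

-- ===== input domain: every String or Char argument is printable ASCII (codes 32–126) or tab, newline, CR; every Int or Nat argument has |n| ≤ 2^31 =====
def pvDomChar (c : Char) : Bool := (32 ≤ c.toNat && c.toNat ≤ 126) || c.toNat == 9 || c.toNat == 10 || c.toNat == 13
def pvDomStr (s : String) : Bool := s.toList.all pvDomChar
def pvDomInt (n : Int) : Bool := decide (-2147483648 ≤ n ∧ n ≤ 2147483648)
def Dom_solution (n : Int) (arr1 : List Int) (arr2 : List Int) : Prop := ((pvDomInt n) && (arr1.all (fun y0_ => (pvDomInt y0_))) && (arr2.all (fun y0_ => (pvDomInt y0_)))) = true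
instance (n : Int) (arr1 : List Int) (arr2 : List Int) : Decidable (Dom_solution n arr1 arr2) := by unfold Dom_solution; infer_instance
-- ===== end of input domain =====

-- B renders each OR-ed row integer once as a zero-padded binary string and maps its
-- characters to '#'/' ', instead of A's per-number hand conversion plus per-bit OR loop (objective: idiomatic).

-- ===== PORT A =====
-- while n != 0: … ; guarded by 0 < v for termination — identical to the Python loop on the
-- nonnegative values admitted by Pre_solution (on negative values the Python loop diverges).
def binNumLoop (v : Int) (res : List Char) : List Char :=
  if h : 0 < v then
    binNumLoop (PySem.Int.floordiv v 2) (PySem.Int.toChars (PySem.Int.mod v 2) ++ res)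
  else res
termination_by v.toNat
decreasing_by
  rw [PySem.Int.floordiv_eq_ediv_of_pos (by omega : (0:Int) < 2)]
  omega

def binNum (v l : Int) : List Char := PySem.Chars.zfill (binNumLoop v []) l

def solution (n : Int) (arr1 : List Int) (arr2 : List Int) : List String :=
  (PySem.List.pyRange 0 n 1).foldl (fun map_fin i =>
    map_fin ++ [String.ofList ((PySem.List.pyRange 0 n 1).foldl (fun row j =>
      if PySem.List.pyGet? (binNum (PySem.List.pyGetD arr1 i 0) n) j = some '1'
        ∨ PySem.List.pyGet? (binNum (PySem.List.pyGetD arr2 i 0) n) j = some '1'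
      then row ++ ['#'] else row ++ [' ']) ([] : List Char))]) []

-- ===== PORT B =====
-- format(v, 'b'): minimal binary digits of v (MSB first), hand-ported
def fmtBinCore (v : Nat) : List Char :=
  if h : v = 0 then [] else fmtBinCore (v / 2) ++ [if v % 2 = 1 then '1' else '0']
termination_by v
decreasing_by exact Nat.div_lt_self (Nat.pos_of_ne_zero h) one_lt_two

-- format(v, '0{w}b') for v ≥ 0
def fmtBin (v w : Nat) : List Char :=
  List.replicate (w - (if v = 0 then ['0'] else fmtBinCore v).length) '0'
    ++ (if v = 0 then ['0'] else fmtBinCore v)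

-- str.translate({48: ' ', 49: '#'})
def translateChar (c : Char) : Char := if c = '1' then '#' else if c = '0' then ' ' else c

def solution_alt (n : Int) (arr1 : List Int) (arr2 : List Int) : List String :=
  (PySem.List.pyRange 0 n 1).map (fun i =>
    String.ofList ((fmtBin (PySem.Int.bor (PySem.List.pyGetD arr1 i 0)
        (PySem.List.pyGetD arr2 i 0)).toNat n.toNat).map translateChar))

-- ===== PRECONDITION & SPEC =====
-- Pre_ restricts to the puzzle's natural domain (lists of length ≥ n whose first n entries
-- lie in [0, 2^n)): outside it A diverges (a negative entry), raises IndexError (a short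
-- list), or returns a row built from two misaligned bit-strings (an entry ≥ 2^n), an
-- accident of zfill that no caller of this puzzle function relies on.
def Pre_solution (n : Int) (arr1 : List Int) (arr2 : List Int) : Prop :=
  n ≤ (arr1.length : Int) ∧ n ≤ (arr2.length : Int) ∧
  (∀ x ∈ arr1.take n.toNat, 0 ≤ x ∧ x < 2 ^ n.toNat) ∧
  (∀ x ∈ arr2.take n.toNat, 0 ≤ x ∧ x < 2 ^ n.toNat)

instance (n : Int) (arr1 : List Int) (arr2 : List Int) : Decidable (Pre_solution n arr1 arr2) := by
  unfold Pre_solution; infer_instance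

def pvWitness_solution : Int × List Int × List Int := (2, [1, 2], [3, 0])

def Spec_solution (n : Int) (arr1 : List Int) (arr2 : List Int) (out : List String) : Prop := out = solution_alt n arr1 arr2
instance (n : Int) (arr1 : List Int) (arr2 : List Int) (out : List String) : Decidable (Spec_solution n arr1 arr2 out) := by unfold Spec_solution; infer_instance

-- ===== CLAIM (what is proved, stated in full; the proofs are below) =====
def Claim_equal_solution : Prop := ∀ (n : Int) (arr1 : List Int) (arr2 : List Int), Dom_solution n arr1 arr2 → Pre_solution n arr1 arr2 → Spec_solution n arr1 arr2 (solution n arr1 arr2)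

-- ===== LEMMAS AND PROOFS =====

-- the common reference value: the low l bits of v, MSB first
def padBin (l v : Nat) : List Char :=
  match l with
  | 0 => []
  | l + 1 => padBin l (v / 2) ++ [if v % 2 = 1 then '1' else '0']

theorem padBin_length (l v : Nat) : (padBin l v).length = l := by
  induction l generalizing v with
  | zero => rfl
  | succ l ih => simp [padBin, ih]

theorem padBin_zero (l : Nat) : padBin l 0 = List.replicate l '0' := by
  induction l with
  | zero => rfl
  | succ l ih =>
    simp only [padBin, ih, Nat.zero_div, Nat.zero_mod]
    rw [List.replicate_succ']
    simp

theorem binNumLoop_eq (v : Nat) (res : List Char) :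
    binNumLoop (v : Int) res = fmtBinCore v ++ res := by
  induction v using Nat.strong_induction_on generalizing res with
  | _ v ih =>
    rw [binNumLoop, fmtBinCore]
    by_cases h : v = 0
    · simp [h]
    · have hpos : (0:Int) < (v:Int) := by omega
      rw [dif_pos hpos, dif_neg h]
      rw [show PySem.Int.floordiv (v:Int) 2 = ((v / 2 : Nat) : Int) from
        PySem.Int.floordiv_natCast v 2]
      rw [show PySem.Int.mod (v:Int) 2 = ((v % 2 : Nat) : Int) from PySem.Int.mod_natCast v 2]
      rw [ih (v / 2) (Nat.div_lt_self (Nat.pos_of_ne_zero h) one_lt_two)]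
      rcases (by omega : v % 2 = 0 ∨ v % 2 = 1) with h2 | h2 <;> simp [h2] <;> rfl

theorem fmtBinCore_chars (v : Nat) : ∀ c ∈ fmtBinCore v, c = '0' ∨ c = '1' := by
  induction v using Nat.strong_induction_on with
  | _ v ih =>
    rw [fmtBinCore]
    by_cases h : v = 0
    · simp [h]
    · rw [dif_neg h]
      intro c hc
      rcases List.mem_append.mp hc with hc | hc
      · exact ih (v / 2) (Nat.div_lt_self (Nat.pos_of_ne_zero h) one_lt_two) c hc
      · rcases (by omega : v % 2 = 0 ∨ v % 2 = 1) with h2 | h2 <;> simp [h2] at hc <;> simp [hc]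

theorem zfill_binary (cs : List Char) (hcs : ∀ c ∈ cs, c = '0' ∨ c = '1') (l : Nat) :
    PySem.Chars.zfill cs (l : Int) = List.replicate (l - cs.length) '0' ++ cs := by
  simp only [PySem.Chars.zfill]
  by_cases hle : (l : Int) ≤ (cs.length : Int)
  · rw [if_pos hle, show l - cs.length = 0 from by omega]
    simp
  · rw [if_neg hle]
    rcases cs with _ | ⟨c, rest⟩
    · simp
    · have hc := hcs c List.mem_cons_self
      have hne : ¬(c = '+' ∨ c = '-') := by
        rcases hc with h | h <;> subst h <;> decide
      simp [hne]

theorem fmtBinCore_pad (l v : Nat) (hv : v < 2 ^ l) :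
    List.replicate (l - (fmtBinCore v).length) '0' ++ fmtBinCore v = padBin l v := by
  induction l generalizing v with
  | zero =>
    have hv0 : v = 0 := by omega
    subst hv0
    simp [fmtBinCore, padBin]
  | succ l ih =>
    by_cases h : v = 0
    · subst h
      rw [fmtBinCore]
      simp [padBin_zero]
    · rw [fmtBinCore, dif_neg h]
      simp only [padBin]
      have hv2 : v / 2 < 2 ^ l := by
        apply Nat.div_lt_of_lt_mul
        simpa [Nat.pow_succ, Nat.mul_comm] using hv
      rw [← ih (v / 2) hv2]
      simp only [List.length_append, List.length_singleton]
      rw [show l + 1 - ((fmtBinCore (v / 2)).length + 1) = l - (fmtBinCore (v / 2)).length from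
        by omega]
      rw [List.append_assoc]

theorem padBin_getElem (l v k : Nat) (hk : k < l) :
    (padBin l v)[k]'(by rw [padBin_length]; exact hk) =
      (if v.testBit (l - 1 - k) then '1' else '0') := by
  induction l generalizing v k with
  | zero => omega
  | succ l ih =>
    simp only [padBin]
    by_cases h : k < l
    · rw [List.getElem_append_left (by rw [padBin_length]; exact h)]
      rw [ih (v / 2) k h]
      have hb : (v / 2).testBit (l - 1 - k) = v.testBit (l + 1 - 1 - k) := by
        rw [show v / 2 = v >>> 1 from (Nat.shiftRight_one v).symm, Nat.testBit_shiftRight]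
        congr 1
        omega
      rw [hb]
    · have hk' : k = l := by omega
      subst hk'
      rw [List.getElem_append_right (by rw [padBin_length])]
      simp [padBin_length, Nat.testBit_zero]

theorem binNum_eq (v l : Nat) (hv : v < 2 ^ l) :
    binNum (v : Int) (l : Int) = padBin l v := by
  unfold binNum
  rw [binNumLoop_eq v [], List.append_nil, zfill_binary _ (fmtBinCore_chars v) l]
  exact fmtBinCore_pad l v hv

theorem fmtBin_eq (v l : Nat) (hv : v < 2 ^ l) (hl : 0 < l) : fmtBin v l = padBin l v := by
  unfold fmtBin
  by_cases h : v = 0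
  · subst h
    simp only [padBin_zero]
    rw [show l = (l - 1) + 1 from by omega, List.replicate_succ']
    simp [show l - 1 + 1 - 1 = l - 1 from by omega]
  · simp only [if_neg h]
    exact fmtBinCore_pad l v hv

theorem row_eq (l a b : Nat) (ha : a < 2 ^ l) (hb : b < 2 ^ l) (hl : 0 < l) :
    (List.range l).map (fun k =>
        if (padBin l a)[k]? = some '1' ∨ (padBin l b)[k]? = some '1' then '#' else ' ')
      = (fmtBin (a ||| b) l).map translateChar := by
  rw [fmtBin_eq (a ||| b) l (Nat.or_lt_two_pow ha hb) hl]
  apply List.ext_getElem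
  · simp [padBin_length]
  · intro k hk1 hk2
    simp only [List.getElem_map, List.getElem_range]
    have hkl : k < l := by simpa using hk1
    rw [List.getElem?_eq_getElem (by rw [padBin_length]; exact hkl),
        List.getElem?_eq_getElem (by rw [padBin_length]; exact hkl)]
    rw [padBin_getElem l a k hkl, padBin_getElem l b k hkl, padBin_getElem l (a ||| b) k hkl]
    rw [Nat.testBit_or]
    by_cases t1 : a.testBit (l - 1 - k) <;> by_cases t2 : b.testBit (l - 1 - k) <;>
      simp [t1, t2, translateChar]

theorem foldl_if_append (xs : List Int) (p : Int → Prop) [DecidablePred p] (init : List Char) :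
    xs.foldl (fun row j => if p j then row ++ ['#'] else row ++ [' ']) init
      = init ++ xs.map (fun j => if p j then '#' else ' ') := by
  induction xs generalizing init with
  | nil => simp
  | cons x xs ih =>
    simp only [List.foldl_cons, List.map_cons]
    by_cases hp : p x <;> simp [hp, ih]

theorem solution_spec : Claim_equal_solution := by
  intro n arr1 arr2 _ hpre
  obtain ⟨h1, h2, h3, h4⟩ := hpre
  unfold Spec_solution solution solution_alt
  rw [PySem.List.foldl_append_singleton_eq_map
    (fun i => String.ofList ((PySem.List.pyRange 0 n 1).foldl (fun row j =>
      if PySem.List.pyGet? (binNum (PySem.List.pyGetD arr1 i 0) n) j = some '1'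
        ∨ PySem.List.pyGet? (binNum (PySem.List.pyGetD arr2 i 0) n) j = some '1'
      then row ++ ['#'] else row ++ [' ']) ([] : List Char)))]
  rw [List.nil_append]
  apply List.map_congr_left
  intro i hi
  have hmem := PySem.List.mem_pyRange_one.mp hi
  have hn1 : (1 : Int) ≤ n := by omega
  set m := n.toNat with hm
  have hnm : (n : Int) = (m : Int) := by omega
  have hk : ∃ k : Nat, (i : Int) = (k : Int) ∧ k < m := ⟨i.toNat, by omega, by omega⟩
  obtain ⟨k, hik, hkm⟩ := hk
  subst hik
  have hlen1 : k < arr1.length := by omega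
  have hlen2 : k < arr2.length := by omega
  have hget1 : PySem.List.pyGetD arr1 (k : Int) 0 = arr1[k] := by
    rw [PySem.List.pyGetD_natCast, List.getD_eq_getElem arr1 0 hlen1]
  have hget2 : PySem.List.pyGetD arr2 (k : Int) 0 = arr2[k] := by
    rw [PySem.List.pyGetD_natCast, List.getD_eq_getElem arr2 0 hlen2]
  have hb1 : 0 ≤ arr1[k] ∧ arr1[k] < 2 ^ m := by
    apply h3
    exact List.mem_take_iff_getElem.mpr ⟨k, by omega, rfl⟩
  have hb2 : 0 ≤ arr2[k] ∧ arr2[k] < 2 ^ m := by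
    apply h4
    exact List.mem_take_iff_getElem.mpr ⟨k, by omega, rfl⟩
  set a := arr1[k].toNat with hadef
  set b := arr2[k].toNat with hbdef
  have hca : arr1[k] = (a : Int) := by omega
  have hcb : arr2[k] = (b : Int) := by omega
  have haB : a < 2 ^ m := by
    have h' := hb1.2
    rw [hca] at h'
    exact_mod_cast h'
  have hbB : b < 2 ^ m := by
    have h' := hb2.2
    rw [hcb] at h'
    exact_mod_cast h'
  rw [hget1, hget2, hca, hcb, PySem.Int.bor_natCast, Int.toNat_natCast, hnm,
    binNum_eq a m haB, binNum_eq b m hbB]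
  rw [foldl_if_append (PySem.List.pyRange 0 (m : Int) 1)
    (fun j => PySem.List.pyGet? (padBin m a) j = some '1'
      ∨ PySem.List.pyGet? (padBin m b) j = some '1') []]
  rw [List.nil_append, PySem.List.pyRange_one 0 (m : Int), List.map_map]
  congr 1
  have hrange : ((m : Int) - 0).toNat = m := by omega
  rw [hrange]
  rw [show ((fun j => if PySem.List.pyGet? (padBin m a) j = some '1'
        ∨ PySem.List.pyGet? (padBin m b) j = some '1' then '#' else ' ')
      ∘ fun k : Nat => (0 : Int) + (k : Int))
    = fun k : Nat => if (padBin m a)[k]? = some '1' ∨ (padBin m b)[k]? = some '1'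
        then '#' else ' ' from by
    funext k
    simp [PySem.List.pyGet?_natCast]]
  exact row_eq m a b haB hbB (by omega)
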